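-- pv_equiv track=rewrite | github.com/andresnboza/Build-an-Arithmetic-Formatter-Project | app.py | get_printable_final_result
-- ===== SOURCE A (Python) =====
-- def get_printable_final_result(matrix, show_answers):
--     top = ""
--     bottom = ""
--     base = ""
--     result = ""
--
--     for operation in matrix:
--         top += operation[0] + "    "
--         bottom += operation[1] + "    "
--         base += operation[2] + "    "
--         result += operation[3] + "    "
--
--     final_result = top.rstrip() + "\n" + bottom.rstrip() + "\n" + base.rstrip()
--
--     if show_answers:
--         final_result += "\n" + result.rstrip()
--
--     return final_result
-- ===== SOURCE B (Python) =====
-- def get_printable_final_result(matrix, show_answers):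
--     lines = ["    ".join(op[i] for op in matrix).rstrip()
--              for i in range(4 if show_answers else 3)]
--     return "\n".join(lines)
-- ===== Notes on version B (the rewrite author's own statement) =====
-- stated objective: idiomatic
-- what changed: Replaces A's row-major loop that grows four accumulator strings with a column-wise build: each output line is ' '.join of one tuple position, rstrip'd, then the lines are '\n'.join'ed.
import Mathlib
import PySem

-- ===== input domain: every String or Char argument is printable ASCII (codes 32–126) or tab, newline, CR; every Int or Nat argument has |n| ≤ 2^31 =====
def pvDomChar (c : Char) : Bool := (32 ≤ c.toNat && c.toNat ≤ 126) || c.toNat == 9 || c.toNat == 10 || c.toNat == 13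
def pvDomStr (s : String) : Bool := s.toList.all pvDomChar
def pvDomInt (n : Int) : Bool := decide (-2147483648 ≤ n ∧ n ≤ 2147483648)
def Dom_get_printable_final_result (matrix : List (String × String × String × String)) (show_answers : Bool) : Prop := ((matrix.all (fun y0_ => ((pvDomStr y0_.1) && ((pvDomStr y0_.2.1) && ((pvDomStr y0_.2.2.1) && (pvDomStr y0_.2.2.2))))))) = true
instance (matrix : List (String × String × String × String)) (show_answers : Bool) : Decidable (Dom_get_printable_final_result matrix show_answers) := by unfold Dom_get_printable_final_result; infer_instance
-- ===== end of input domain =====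

-- B replaces A's row-major accumulation of four growing strings by a column-wise
-- '    '.join over each tuple position followed by rstrip; objective: idiomatic.

-- the four-space separator A appends after every cell
def pvSep : List Char := [' ', ' ', ' ', ' ']

-- ===== PORT A =====
-- one pass over the rows, four accumulator strings (ported on List Char via PySem.Chars)
def get_printable_final_result (matrix : List (String × String × String × String)) (show_answers : Bool) : String :=
  let st := matrix.foldl
    (fun (acc : List Char × List Char × List Char × List Char) op =>
      (acc.1 ++ op.1.toList ++ pvSep,
       acc.2.1 ++ op.2.1.toList ++ pvSep,
       acc.2.2.1 ++ op.2.2.1.toList ++ pvSep,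
       acc.2.2.2 ++ op.2.2.2.toList ++ pvSep))
    ([], [], [], [])
  let fr := PySem.Chars.rstrip st.1 ++ '\n' :: PySem.Chars.rstrip st.2.1
              ++ '\n' :: PySem.Chars.rstrip st.2.2.1
  String.ofList (if show_answers then fr ++ '\n' :: PySem.Chars.rstrip st.2.2.2 else fr)

-- ===== PORT B =====
-- op[i] for a 4-tuple row
def pvProj (i : Nat) (op : String × String × String × String) : List Char :=
  match i with
  | 0 => op.1.toList
  | 1 => op.2.1.toList
  | 2 => op.2.2.1.toList
  | _ => op.2.2.2.toList

def get_printable_final_result_alt (matrix : List (String × String × String × String)) (show_answers : Bool) : String :=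
  let lines := (List.range (if show_answers then 4 else 3)).map
    (fun i => PySem.Chars.rstrip (PySem.Chars.join pvSep (matrix.map (pvProj i))))
  String.ofList (PySem.Chars.join ['\n'] lines)

-- ===== PRECONDITION & SPEC =====
def Spec_get_printable_final_result (matrix : List (String × String × String × String)) (show_answers : Bool) (out : String) : Prop := out = get_printable_final_result_alt matrix show_answers
instance (matrix : List (String × String × String × String)) (show_answers : Bool) (out : String) : Decidable (Spec_get_printable_final_result matrix show_answers out) := by unfold Spec_get_printable_final_result; infer_instance

-- ===== CLAIM (what is proved, stated in full; the proofs are below) =====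
def Claim_equal_get_printable_final_result : Prop := ∀ (matrix : List (String × String × String × String)) (show_answers : Bool), Dom_get_printable_final_result matrix show_answers → Spec_get_printable_final_result matrix show_answers (get_printable_final_result matrix show_answers)

-- ===== LEMMAS AND PROOFS =====

-- A's foldl state, componentwise: each accumulator is the flatMap of its column with pvSep appended to every cell
theorem pvFoldl_eq (matrix : List (String × String × String × String))
    (acc : List Char × List Char × List Char × List Char) :
    matrix.foldl
      (fun (acc : List Char × List Char × List Char × List Char) op =>
        (acc.1 ++ op.1.toList ++ pvSep,
         acc.2.1 ++ op.2.1.toList ++ pvSep,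
         acc.2.2.1 ++ op.2.2.1.toList ++ pvSep,
         acc.2.2.2 ++ op.2.2.2.toList ++ pvSep)) acc
    = (acc.1 ++ matrix.flatMap (fun op => pvProj 0 op ++ pvSep),
       acc.2.1 ++ matrix.flatMap (fun op => pvProj 1 op ++ pvSep),
       acc.2.2.1 ++ matrix.flatMap (fun op => pvProj 2 op ++ pvSep),
       acc.2.2.2 ++ matrix.flatMap (fun op => pvProj 3 op ++ pvSep)) := by
  induction matrix generalizing acc with
  | nil => simp
  | cons op rest ih => rw [List.foldl_cons, ih]; simp [pvProj]

-- trailing run of spaces is invisible to rstrip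
theorem pvRstrip_append_sep (xs : List Char) :
    PySem.Chars.rstrip (xs ++ pvSep) = PySem.Chars.rstrip xs := by
  simp [PySem.Chars.rstrip, pvSep, PySem.Chars.isspace]

-- rstrip only looks at the tail: a common prefix can be prepended on both sides
theorem pvRstrip_append_congr (a xs ys : List Char)
    (h : PySem.Chars.rstrip xs = PySem.Chars.rstrip ys) :
    PySem.Chars.rstrip (a ++ xs) = PySem.Chars.rstrip (a ++ ys) := by
  have h' : List.dropWhile PySem.Chars.isspace xs.reverse
      = List.dropWhile PySem.Chars.isspace ys.reverse := by
    have := congrArg List.reverse h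
    simpa [PySem.Chars.rstrip] using this
  simp [PySem.Chars.rstrip, List.dropWhile_append, h']

-- cell++sep concatenation rstrips to the same thing as the sep-join of the cells
theorem pvRstrip_flatMap_eq_join (l : List (List Char)) :
    PySem.Chars.rstrip (l.flatMap (fun p => p ++ pvSep))
      = PySem.Chars.rstrip (PySem.Chars.join pvSep l) := by
  induction l with
  | nil => simp [PySem.Chars.join, List.intercalate]
  | cons p rest ih =>
    cases rest with
    | nil => simp [PySem.Chars.join, List.intercalate, pvRstrip_append_sep]
    | cons q rest' =>
      rw [PySem.Chars.join_cons_cons, List.flatMap_cons]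
      exact pvRstrip_append_congr (p ++ pvSep) _ _ ih

theorem get_printable_final_result_spec' (matrix : List (String × String × String × String)) (show_answers : Bool) :
    get_printable_final_result matrix show_answers = get_printable_final_result_alt matrix show_answers := by
  unfold get_printable_final_result get_printable_final_result_alt
  rw [pvFoldl_eq]
  have h : ∀ i, PySem.Chars.rstrip (matrix.flatMap (fun op => pvProj i op ++ pvSep))
      = PySem.Chars.rstrip (PySem.Chars.join pvSep (matrix.map (pvProj i))) := by
    intro i
    rw [← pvRstrip_flatMap_eq_join]
    simp [List.flatMap_map]
  cases show_answers <;>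
    simp [h, List.range_succ, PySem.Chars.join, List.intercalate, List.intersperse]

-- ===== VERDICT (by name: the statement is the Claim_ definition above) =====
theorem get_printable_final_result_spec : Claim_equal_get_printable_final_result := by
  intro matrix show_answers _
  exact get_printable_final_result_spec' matrix show_answers
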